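-- pv_equiv track=rewrite | github.com/Timikana/rootwarden | backend/server_checks.py | parse_os_release
-- ===== SOURCE A (Python) =====
-- def parse_os_release(output):
--     """
--     Extrait la version lisible depuis la sortie brute de /etc/os-release.
--
--     Cherche en priorité la clé ``PRETTY_NAME``, puis ``VERSION`` comme fallback.
--     Si aucune des deux n'est trouvée, retourne "Inconnue".
--
--     Args:
--         output (str): Contenu brut de /etc/os-release (typiquement retourné
--                       par get_linux_version).
--
--     Returns:
--         Chaîne de version lisible (ex: "Ubuntu 22.04.4 LTS"), ou "Inconnue".
--     """
--     lines = output.splitlines()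
--     pretty = "Inconnue"
--     for line in lines:
--         if line.startswith('PRETTY_NAME='):
--             pretty = line.split('=', 1)[1].strip().strip('"')
--             break
--         elif line.startswith('VERSION='):
--             pretty = line.split('=', 1)[1].strip().strip('"')
--     return pretty
-- ===== SOURCE B (Python) =====
-- def parse_os_release(output):
--     """Two explicit passes: first pass returns the first PRETTY_NAME value;
--     only if none exists, a second pass keeps the last VERSION value."""
--     lines = output.splitlines()
--     for line in lines:
--         if line.startswith('PRETTY_NAME='):
--             return line.split('=', 1)[1].strip().strip('"')
--     result = "Inconnue"
--     for line in lines: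
--         if line.startswith('VERSION='):
--             result = line.split('=', 1)[1].strip().strip('"')
--     return result
-- ===== Notes on version B (the rewrite author's own statement) =====
-- stated objective: simpler
-- what changed: Replaces the single interleaved break/accumulator loop with two separate passes: an early-return search for the first PRETTY_NAME line, then a fallback pass keeping the last VERSION line.
import Mathlib
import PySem

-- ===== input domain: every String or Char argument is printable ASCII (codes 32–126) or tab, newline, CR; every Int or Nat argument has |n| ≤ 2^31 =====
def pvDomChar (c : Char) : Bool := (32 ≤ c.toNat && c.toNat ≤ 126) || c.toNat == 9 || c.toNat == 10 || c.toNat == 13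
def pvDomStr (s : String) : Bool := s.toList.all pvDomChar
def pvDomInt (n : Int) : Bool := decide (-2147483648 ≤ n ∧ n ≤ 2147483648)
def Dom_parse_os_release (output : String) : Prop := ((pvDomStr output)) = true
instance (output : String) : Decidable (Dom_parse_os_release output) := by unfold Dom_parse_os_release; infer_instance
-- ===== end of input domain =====

-- B replaces A's single interleaved break/accumulator loop by two explicit passes
-- (first PRETTY_NAME, else last VERSION); same O(n) cost, plainer decomposition.

-- shared value extraction: line.split('=', 1)[1].strip().strip('"')
-- (the [1] default "" is never reached: both call sites guard with startswith on a prefix containing '=')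
def pvVal (line : String) : String :=
  PySem.Str.stripChars
    (PySem.Str.strip ((PySem.List.pyGet? ((PySem.Str.splitMax? line "=" 1).getD []) 1).getD ""))
    "\""

-- ===== PORT A =====
-- A's single loop: break on the first PRETTY_NAME line, else accumulate the last VERSION line
def pvLoopA : List String → String → String
  | [], pretty => pretty
  | line :: rest, pretty =>
    if PySem.Str.startswith line "PRETTY_NAME=" then pvVal line
    else if PySem.Str.startswith line "VERSION=" then pvLoopA rest (pvVal line)
    else pvLoopA rest pretty

def parse_os_release (output : String) : String :=
  pvLoopA (PySem.Str.splitlines output) "Inconnue"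

-- ===== PORT B =====
-- pass 1: early-return search for the first PRETTY_NAME line
def pvFindPretty : List String → Option String
  | [] => none
  | line :: rest =>
    if PySem.Str.startswith line "PRETTY_NAME=" then some (pvVal line)
    else pvFindPretty rest

-- pass 2: result variable updated on every VERSION line (last one wins)
def pvLastVersion : List String → String → String
  | [], result => result
  | line :: rest, result =>
    pvLastVersion rest (if PySem.Str.startswith line "VERSION=" then pvVal line else result)

def parse_os_release_alt (output : String) : String :=
  match pvFindPretty (PySem.Str.splitlines output) with
  | some v => v
  | none => pvLastVersion (PySem.Str.splitlines output) "Inconnue"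

-- ===== PRECONDITION & SPEC =====
def Spec_parse_os_release (output : String) (out : String) : Prop := out = parse_os_release_alt output
instance (output : String) (out : String) : Decidable (Spec_parse_os_release output out) := by unfold Spec_parse_os_release; infer_instance

-- ===== CLAIM (what is proved, stated in full; the proofs are below) =====
def Claim_equal_parse_os_release : Prop := ∀ (output : String), Dom_parse_os_release output → Spec_parse_os_release output (parse_os_release output)

-- ===== LEMMAS AND PROOFS =====
theorem pvLoopA_eq (lines : List String) : ∀ (r : String),
    pvLoopA lines r =
      match pvFindPretty lines with
      | some v => v
      | none => pvLastVersion lines r := by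
  induction lines with
  | nil => intro r; rfl
  | cons line rest ih =>
    intro r
    simp only [pvLoopA, pvFindPretty, pvLastVersion]
    split_ifs with hp hv <;> simp [ih]

-- ===== VERDICT (by name: the statement is the Claim_ definition above) =====
theorem parse_os_release_spec : Claim_equal_parse_os_release := by
  intro output _
  show parse_os_release output = parse_os_release_alt output
  unfold parse_os_release parse_os_release_alt
  exact pvLoopA_eq _ _
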